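-- pv_equiv track=rewrite | github.com/rmfulton/BenjaminProblem | solution.py | samantha_knows_that_peter_doesnt_know_x_and_y_pairs
-- ===== SOURCE A (Python) =====
-- def all_pairs(start=3, stop=97):
--     pairs = []
--     for x in range(start, stop+1):
--         for y in range(x, stop+1):
--             pairs.append((x,y))
--     return pairs
--
-- def peter_doesnt_know_x_and_y_pairs(start=3, stop=97):
--     pairs = all_pairs(start, stop)
--     allPairsThatMultiplyToP = get_all_pairs_that_multiply_to_p( pairs )
--
--     return get_ambiguous_product_pairs(allPairsThatMultiplyToP)
--
-- def samantha_knows_that_peter_doesnt_know_x_and_y_pairs(start=3, stop=97):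
--     ambiguous_product_pairs = peter_doesnt_know_x_and_y_pairs(start, stop)
--     allPairsThatAddToS = get_all_pairs_that_add_to_s(all_pairs(start, stop))
--
--     res = []
--     for pairs in allPairsThatAddToS.values():
--         peter_doesnt_know = lambda x: x in ambiguous_product_pairs
--         if all(map(peter_doesnt_know, pairs)):
--             res += pairs
--     return res
--
-- def get_all_pairs_that_multiply_to_p(pairs):
--     allPairsThatMultiplyToP = dict()
--     for pair in pairs:
--         product = pair[0]*pair[1]
--         if product not in allPairsThatMultiplyToP:
--             allPairsThatMultiplyToP[product] = []
--         allPairsThatMultiplyToP[product].append(pair)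
--     return allPairsThatMultiplyToP
--
-- def get_all_pairs_that_add_to_s(pairs):
--     allPairsThatAddToS = dict()
--     for pair in pairs:
--         s = pair[0]+pair[1]
--         if s not in allPairsThatAddToS:
--             allPairsThatAddToS[s] = []
--         allPairsThatAddToS[s].append(pair)
--     return allPairsThatAddToS
--
-- def get_ambiguous_product_pairs(allPairsThatMultiplyToP):
--     ambiguous_product_pairs = []
--     for L in allPairsThatMultiplyToP.values():
--         if len(L) > 1:
--             ambiguous_product_pairs += L
--     return ambiguous_product_pairs
-- ===== SOURCE B (Python) =====
-- def samantha_knows_that_peter_doesnt_know_x_and_y_pairs(start=3, stop=97):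
--     # A pair is ambiguous for Peter iff its product has another factorization
--     # inside the range; test that per pair and walk the sums in ascending order.
--     def has_other_factorization(x, y):
--         p = x * y
--         for a in range(start, stop + 1):
--             if p % a == 0:
--                 b = p // a
--                 if a <= b <= stop and (a, b) != (x, y):
--                     return True
--         return False
--     res = []
--     for s in range(2 * start, 2 * stop + 1):
--         group = [(x, s - x) for x in range(max(start, s - stop), s // 2 + 1)]
--         if all(has_other_factorization(x, y) for (x, y) in group):
--             res += group
--     return res
-- ===== Notes on version B (the rewrite author's own statement) =====
-- stated objective: alternative
-- what changed: Replaces A's three grouping dicts and per-pair linear membership scans of the ambiguous list by a direct per-pair divisor test (does the product admit another in-range factorization?) plus an arithmetic walk over the sums that generates each sum group in closed form; Pre_ restricts to ranges not containing 0, the puzzle's natural domain, since B's divisor test divides by zero when 0 is in the range.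
-- outside the precondition, e.g. on samantha_knows_that_peter_doesnt_know_x_and_y_pairs(0, 3): A returns [(0, 0), (0, 1)], B raises ZeroDivisionError
import Mathlib
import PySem

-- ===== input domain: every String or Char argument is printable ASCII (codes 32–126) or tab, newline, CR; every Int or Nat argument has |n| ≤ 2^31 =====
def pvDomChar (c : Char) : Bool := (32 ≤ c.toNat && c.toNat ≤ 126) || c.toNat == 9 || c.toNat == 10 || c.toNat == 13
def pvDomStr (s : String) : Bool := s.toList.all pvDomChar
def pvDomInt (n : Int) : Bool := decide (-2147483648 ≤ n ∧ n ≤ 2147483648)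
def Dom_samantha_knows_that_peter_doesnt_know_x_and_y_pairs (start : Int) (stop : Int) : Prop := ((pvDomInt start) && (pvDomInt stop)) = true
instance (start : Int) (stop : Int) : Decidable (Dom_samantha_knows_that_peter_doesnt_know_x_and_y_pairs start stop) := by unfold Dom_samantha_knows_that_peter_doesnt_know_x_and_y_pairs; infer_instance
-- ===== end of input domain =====

-- B replaces A's grouping dicts and per-pair linear scans of the ambiguous list by a direct
-- per-pair divisor test and an arithmetic walk over the sums in ascending order;
-- Pre_ keeps to ranges not containing 0, where B's divisor test would divide by zero.


-- ===== PORT A =====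
def all_pairs (start : Int) (stop : Int) : List (Int × Int) :=
  (PySem.List.pyRange start (stop + 1) 1).foldl (fun pairs x =>
    (PySem.List.pyRange x (stop + 1) 1).foldl (fun pairs y => pairs ++ [(x, y)]) pairs) []

def get_all_pairs_that_multiply_to_p (pairs : List (Int × Int)) : PySem.Dict Int (List (Int × Int)) :=
  pairs.foldl (fun d pair => d.modify (pair.1 * pair.2) [] (· ++ [pair])) PySem.Dict.empty

def get_all_pairs_that_add_to_s (pairs : List (Int × Int)) : PySem.Dict Int (List (Int × Int)) :=
  pairs.foldl (fun d pair => d.modify (pair.1 + pair.2) [] (· ++ [pair])) PySem.Dict.empty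

def get_ambiguous_product_pairs (d : PySem.Dict Int (List (Int × Int))) : List (Int × Int) :=
  d.values.foldl (fun acc L => if 1 < L.length then acc ++ L else acc) []

def peter_doesnt_know_x_and_y_pairs (start : Int) (stop : Int) : List (Int × Int) :=
  get_ambiguous_product_pairs (get_all_pairs_that_multiply_to_p (all_pairs start stop))

def samantha_knows_that_peter_doesnt_know_x_and_y_pairs (start : Int) (stop : Int) : List (Int × Int) :=
  let ambiguous := peter_doesnt_know_x_and_y_pairs start stop
  let dS := get_all_pairs_that_add_to_s (all_pairs start stop)
  dS.values.foldl (fun res pairs =>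
    if pairs.all (fun p => ambiguous.contains p) then res ++ pairs else res) []

-- ===== PORT B =====
def has_other_factorization (start : Int) (stop : Int) (x : Int) (y : Int) : Bool :=
  let p := x * y
  (PySem.List.pyRange start (stop + 1) 1).any (fun a =>
    if PySem.Int.mod p a = 0 then
      let b := PySem.Int.floordiv p a
      decide (a ≤ b) && decide (b ≤ stop) && decide ((a, b) ≠ (x, y))
    else false)

def samantha_knows_that_peter_doesnt_know_x_and_y_pairs_alt (start : Int) (stop : Int) : List (Int × Int) :=
  (PySem.List.pyRange (2 * start) (2 * stop + 1) 1).foldl (fun res s =>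
    let group := (PySem.List.pyRange (max start (s - stop)) (PySem.Int.floordiv s 2 + 1) 1).map
      (fun x => (x, s - x))
    if group.all (fun q => has_other_factorization start stop q.1 q.2) then res ++ group
    else res) []

-- ===== PRECONDITION & SPEC =====
-- Pre_ excludes ranges containing 0 (start ≤ 0 ≤ stop), where A still returns a value but the
-- natural divisor test of B raises ZeroDivisionError; the puzzle's domain is positive integers.
def Pre_samantha_knows_that_peter_doesnt_know_x_and_y_pairs (start : Int) (stop : Int) : Prop := ¬ (start ≤ 0 ∧ 0 ≤ stop)
instance (start : Int) (stop : Int) : Decidable (Pre_samantha_knows_that_peter_doesnt_know_x_and_y_pairs start stop) := by unfold Pre_samantha_knows_that_peter_doesnt_know_x_and_y_pairs; infer_instance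
def pvWitness_samantha_knows_that_peter_doesnt_know_x_and_y_pairs : Int × Int := (3, 97)

def Spec_samantha_knows_that_peter_doesnt_know_x_and_y_pairs (start : Int) (stop : Int) (out : List (Int × Int)) : Prop := out = samantha_knows_that_peter_doesnt_know_x_and_y_pairs_alt start stop
instance (start : Int) (stop : Int) (out : List (Int × Int)) : Decidable (Spec_samantha_knows_that_peter_doesnt_know_x_and_y_pairs start stop out) := by unfold Spec_samantha_knows_that_peter_doesnt_know_x_and_y_pairs; infer_instance

-- ===== CLAIM (what is proved, stated in full; the proofs are below) =====
def Claim_equal_samantha_knows_that_peter_doesnt_know_x_and_y_pairs : Prop := ∀ (start : Int) (stop : Int), Dom_samantha_knows_that_peter_doesnt_know_x_and_y_pairs start stop → Pre_samantha_knows_that_peter_doesnt_know_x_and_y_pairs start stop → Spec_samantha_knows_that_peter_doesnt_know_x_and_y_pairs start stop (samantha_knows_that_peter_doesnt_know_x_and_y_pairs start stop)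

-- ===== LEMMAS AND PROOFS =====

def pvLex (a b : Int) : List (Int × Int) :=
  (PySem.List.pyRange a (b + 1) 1).flatMap (fun x =>
    (PySem.List.pyRange x (b + 1) 1).map (fun y => (x, y)))

def pvGrp (a b s : Int) : List (Int × Int) :=
  (PySem.List.pyRange (max a (s - b)) (PySem.Int.floordiv s 2 + 1) 1).map (fun x => (x, s - x))

theorem pv_all_pairs_eq (a b : Int) : all_pairs a b = pvLex a b := by
  unfold all_pairs pvLex
  simp only [PySem.List.foldl_append_singleton_eq_map, PySem.List.foldl_append_eq_flatMap,
    List.nil_append]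

theorem pv_mem_lex {a b : Int} {q : Int × Int} :
    q ∈ pvLex a b ↔ a ≤ q.1 ∧ q.1 ≤ q.2 ∧ q.2 ≤ b := by
  obtain ⟨q1, q2⟩ := q
  simp only [pvLex, List.mem_flatMap, List.mem_map, PySem.List.mem_pyRange_one]
  constructor
  · rintro ⟨x, hx, y, hy, heq⟩
    injection heq with h1 h2
    subst h1; subst h2
    exact ⟨hx.1, hy.1, by omega⟩
  · rintro ⟨h1, h2, h3⟩
    exact ⟨q1, ⟨h1, by omega⟩, q2, ⟨h2, by omega⟩, rfl⟩

theorem pv_map_add (c u v : Int) :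
    (PySem.List.pyRange u v 1).map (fun y => c + y) = PySem.List.pyRange (c + u) (c + v) 1 := by
  rw [PySem.List.pyRange_one u v, PySem.List.pyRange_one (c + u) (c + v)]
  have h : (c + v - (c + u)).toNat = (v - u).toNat := by omega
  rw [h, List.map_map]
  apply List.map_congr_left
  intro k _
  simp only [Function.comp_apply]
  omega

theorem pv_filter_eq_range (u v t : Int) :
    (PySem.List.pyRange u v 1).filter (fun y => y == t) =
      if u ≤ t ∧ t < v then [t] else [] := by
  induction hn : (v - u).toNat generalizing u with
  | zero =>
    rw [PySem.List.pyRange_one_eq_nil (by omega), List.filter_nil, if_neg (by omega)]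
  | succ n ih =>
    have hlt : u < v := by omega
    rw [PySem.List.pyRange_one_cons hlt, List.filter_cons, ih (u + 1) (by omega)]
    by_cases ht : u = t
    · subst ht
      simp only [BEq.rfl, if_pos trivial]
      rw [if_neg (by omega), if_pos (by omega)]
    · have hb : (u == t) = false := by simp [ht]
      rw [hb]
      simp only [Bool.false_eq_true, if_false]
      by_cases hc : u + 1 ≤ t ∧ t < v
      · rw [if_pos hc, if_pos (by omega)]
      · rw [if_neg hc, if_neg (by omega)]

theorem pv_lex_row (a b : Int) (h : a ≤ b) :
    pvLex a b = (PySem.List.pyRange a (b + 1) 1).map (fun y => (a, y)) ++ pvLex (a + 1) b := by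
  have h1 : PySem.List.pyRange a (b + 1) 1 = a :: PySem.List.pyRange (a + 1) (b + 1) 1 :=
    PySem.List.pyRange_one_cons (by omega)
  unfold pvLex
  rw [show List.flatMap (fun x => List.map (fun y => (x, y)) (PySem.List.pyRange x (b + 1) 1))
        (PySem.List.pyRange a (b + 1) 1) =
      List.flatMap (fun x => List.map (fun y => (x, y)) (PySem.List.pyRange x (b + 1) 1))
        (a :: PySem.List.pyRange (a + 1) (b + 1) 1) from by rw [h1]]
  rw [List.flatMap_cons]

theorem pv_sums (a b : Int) :
    PySem.Set.ofList ((pvLex a b).map (fun q => q.1 + q.2)) =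
      PySem.List.pyRange (2 * a) (2 * b + 1) 1 := by
  induction hn : (b + 1 - a).toNat generalizing a with
  | zero =>
    have h1 : pvLex a b = [] := by
      unfold pvLex
      rw [PySem.List.pyRange_one_eq_nil (by omega)]
      rfl
    rw [h1, PySem.List.pyRange_one_eq_nil (by omega)]
    rfl
  | succ n ih =>
    have hab : a ≤ b := by omega
    rw [pv_lex_row a b hab, List.map_append, List.map_map]
    rw [show ((fun q : Int × Int => q.1 + q.2) ∘ fun y => (a, y)) = (fun y => a + y) from rfl]
    rw [pv_map_add a a (b + 1)]
    rw [PySem.Set.ofList_append,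
      PySem.Set.ofList_eq_self_of_nodup _ (PySem.List.nodup_pyRange_one _ _),
      PySem.Set.update_eq_append_filter, ih (a + 1) (by omega)]
    have hfc : ∀ y ∈ PySem.List.pyRange (2 * (a + 1)) (2 * b + 1) 1,
        (!(PySem.Set.contains (PySem.List.pyRange (a + a) (a + (b + 1)) 1) y)) =
          decide (a + b + 1 ≤ y) := by
      intro y hy
      have hy' := PySem.List.mem_pyRange_one.mp hy
      by_cases hle : a + b + 1 ≤ y
      · have hnm : y ∉ PySem.List.pyRange (a + a) (a + (b + 1)) 1 := by
          rw [PySem.List.mem_pyRange_one]; omega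
        have hcf : PySem.Set.contains (PySem.List.pyRange (a + a) (a + (b + 1)) 1) y = false := by
          rw [Bool.eq_false_iff]
          intro hct
          exact hnm ((PySem.Set.contains_iff _ _).mp hct)
        rw [hcf]
        simp [hle]
      · have hm : y ∈ PySem.List.pyRange (a + a) (a + (b + 1)) 1 :=
          PySem.List.mem_pyRange_one.mpr (by omega)
        rw [(PySem.Set.contains_iff _ _).mpr hm]
        simp [hle]
    rw [List.filter_congr hfc]
    by_cases hc : a + 1 ≤ b
    · rw [PySem.List.pyRange_one_append (2 * (a + 1)) (a + b + 1) (2 * b + 1) (by omega) (by omega),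
        List.filter_append]
      have e1 : (PySem.List.pyRange (2 * (a + 1)) (a + b + 1) 1).filter
          (fun y => decide (a + b + 1 ≤ y)) = [] := by
        rw [List.filter_eq_nil_iff]
        intro y hy
        have := PySem.List.mem_pyRange_one.mp hy
        simp only [decide_eq_true_eq]
        omega
      have e2 : (PySem.List.pyRange (a + b + 1) (2 * b + 1) 1).filter
          (fun y => decide (a + b + 1 ≤ y)) = PySem.List.pyRange (a + b + 1) (2 * b + 1) 1 := by
        rw [List.filter_eq_self]
        intro y hy
        have := PySem.List.mem_pyRange_one.mp hy
        simp only [decide_eq_true_eq]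
        omega
      rw [e1, e2, List.nil_append,
        show a + a = 2 * a from by omega, show a + (b + 1) = a + b + 1 from by omega]
      exact (PySem.List.pyRange_one_append (2 * a) (a + b + 1) (2 * b + 1) (by omega) (by omega)).symm
    · have hb : a = b := by omega
      rw [PySem.List.pyRange_one_eq_nil (show (2 * b + 1 : Int) ≤ 2 * (a + 1) by omega),
        List.filter_nil, List.append_nil,
        show a + a = 2 * a from by omega, show a + (b + 1) = 2 * b + 1 from by omega]

theorem pv_group (a b s : Int) :
    (pvLex a b).filter (fun q => q.1 + q.2 == s) = pvGrp a b s := by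
  have hd := PySem.Int.floordiv_mul_add_mod s 2
  have h0 := PySem.Int.mod_nonneg s (show (0:Int) < 2 by omega)
  have h1 := PySem.Int.mod_lt s (show (0:Int) < 2 by omega)
  induction hn : (b + 1 - a).toNat generalizing a with
  | zero =>
    have hL : pvLex a b = [] := by
      unfold pvLex
      rw [PySem.List.pyRange_one_eq_nil (by omega)]
      rfl
    rw [hL, List.filter_nil]
    unfold pvGrp
    rw [PySem.List.pyRange_one_eq_nil (by omega), List.map_nil]
  | succ n ih =>
    have hab : a ≤ b := by omega
    rw [pv_lex_row a b hab, List.filter_append, List.filter_map]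
    rw [show ((fun q : Int × Int => q.1 + q.2 == s) ∘ fun y => (a, y)) = (fun y => a + y == s)
      from rfl]
    rw [List.filter_congr (show ∀ y ∈ PySem.List.pyRange a (b + 1) 1,
        ((fun y => a + y == s) y) = ((fun y => y == s - a) y) from by
      intro y _
      rw [Bool.eq_iff_iff]
      simp only [beq_iff_eq]
      omega)]
    rw [pv_filter_eq_range a (b + 1) (s - a), ih (a + 1) (by omega)]
    by_cases hc1 : 2 * a ≤ s ∧ s ≤ a + b
    · rw [if_pos (by omega)]
      unfold pvGrp
      rw [show max a (s - b) = a from by omega,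
        show max (a + 1) (s - b) = a + 1 from by omega,
        PySem.List.pyRange_one_cons (show a < PySem.Int.floordiv s 2 + 1 by omega),
        List.map_cons, List.map_cons]
      rfl
    · by_cases hs : s < 2 * a
      · rw [if_neg (by omega), List.map_nil, List.nil_append]
        unfold pvGrp
        rw [PySem.List.pyRange_one_eq_nil (by omega),
          PySem.List.pyRange_one_eq_nil (by omega)]
      · rw [if_neg (by omega), List.map_nil, List.nil_append]
        unfold pvGrp
        rw [show max (a + 1) (s - b) = s - b from by omega,
          show max a (s - b) = s - b from by omega]

theorem pv_dp_getD (a b k : Int) :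
    (get_all_pairs_that_multiply_to_p (all_pairs a b)).getD k [] =
      (pvLex a b).filter (fun q => q.1 * q.2 == k) := by
  unfold get_all_pairs_that_multiply_to_p
  rw [pv_all_pairs_eq]
  have h : (pvLex a b).foldl (fun d pair => d.modify (pair.1 * pair.2) [] (· ++ [pair]))
        PySem.Dict.empty =
      ((pvLex a b).map (fun q => (q.1 * q.2, q))).foldl
        (fun d p => d.modify p.1 [] (· ++ [p.2])) PySem.Dict.empty := by
    rw [List.foldl_map]
  rw [h, PySem.Dict.getD_foldl_modify_append, PySem.Dict.getD_empty, List.nil_append,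
    List.filter_map, List.map_map]
  rw [show ((fun x : Int × (Int × Int) => x.2) ∘ fun q : Int × Int => (q.1 * q.2, q)) =
    (fun q : Int × Int => q) from rfl]
  rw [List.map_id_fun']
  rfl

theorem pv_dp_keys (a b : Int) :
    (get_all_pairs_that_multiply_to_p (all_pairs a b)).keys =
      PySem.Set.ofList ((pvLex a b).map (fun q => q.1 * q.2)) := by
  unfold get_all_pairs_that_multiply_to_p
  rw [pv_all_pairs_eq]
  rw [PySem.Dict.keys_foldl_modify_key (pvLex a b) (fun q : Int × Int => q.1 * q.2) []
    (fun _ pair => (· ++ [pair])) PySem.Dict.empty]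
  rw [PySem.Dict.keys_empty, PySem.Set.update_nil_left]

theorem pv_dp_nodup (a b : Int) :
    (get_all_pairs_that_multiply_to_p (all_pairs a b)).keys.Nodup := by
  unfold get_all_pairs_that_multiply_to_p
  exact PySem.Dict.nodup_keys_foldl_modify_key _ (fun q : Int × Int => q.1 * q.2) []
    (fun _ pair => (· ++ [pair])) _ PySem.Dict.nodup_keys_empty

theorem pv_dS_getD (a b k : Int) :
    (get_all_pairs_that_add_to_s (all_pairs a b)).getD k [] =
      (pvLex a b).filter (fun q => q.1 + q.2 == k) := by
  unfold get_all_pairs_that_add_to_s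
  rw [pv_all_pairs_eq]
  have h : (pvLex a b).foldl (fun d pair => d.modify (pair.1 + pair.2) [] (· ++ [pair]))
        PySem.Dict.empty =
      ((pvLex a b).map (fun q => (q.1 + q.2, q))).foldl
        (fun d p => d.modify p.1 [] (· ++ [p.2])) PySem.Dict.empty := by
    rw [List.foldl_map]
  rw [h, PySem.Dict.getD_foldl_modify_append, PySem.Dict.getD_empty, List.nil_append,
    List.filter_map, List.map_map]
  rw [show ((fun x : Int × (Int × Int) => x.2) ∘ fun q : Int × Int => (q.1 + q.2, q)) =
    (fun q : Int × Int => q) from rfl]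
  rw [List.map_id_fun']
  rfl

theorem pv_dS_keys (a b : Int) :
    (get_all_pairs_that_add_to_s (all_pairs a b)).keys =
      PySem.Set.ofList ((pvLex a b).map (fun q => q.1 + q.2)) := by
  unfold get_all_pairs_that_add_to_s
  rw [pv_all_pairs_eq]
  rw [PySem.Dict.keys_foldl_modify_key (pvLex a b) (fun q : Int × Int => q.1 + q.2) []
    (fun _ pair => (· ++ [pair])) PySem.Dict.empty]
  rw [PySem.Dict.keys_empty, PySem.Set.update_nil_left]

theorem pv_dS_nodup (a b : Int) :
    (get_all_pairs_that_add_to_s (all_pairs a b)).keys.Nodup := by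
  unfold get_all_pairs_that_add_to_s
  exact PySem.Dict.nodup_keys_foldl_modify_key _ (fun q : Int × Int => q.1 + q.2) []
    (fun _ pair => (· ++ [pair])) _ PySem.Dict.nodup_keys_empty

theorem pv_amb_mem (a b : Int) (q : Int × Int) (hq : q ∈ pvLex a b) :
    q ∈ peter_doesnt_know_x_and_y_pairs a b ↔
      1 < ((pvLex a b).filter (fun r => r.1 * r.2 == q.1 * q.2)).length := by
  unfold peter_doesnt_know_x_and_y_pairs get_ambiguous_product_pairs
  rw [PySem.List.foldl_ite_eq_foldl_filter, PySem.List.foldl_append_eq_flatten,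
    List.nil_append,
    PySem.Dict.values_eq_map_keys _ (pv_dp_nodup a b) [],
    pv_dp_keys]
  simp only [List.mem_flatten, List.mem_filter, List.mem_map, PySem.Set.mem_ofList,
    decide_eq_true_eq]
  constructor
  · rintro ⟨l, ⟨⟨k, hk, rfl⟩, hlen⟩, hql⟩
    rw [pv_dp_getD] at hql hlen
    have hk2 : q.1 * q.2 = k := by
      have := (List.mem_filter.mp hql).2
      simpa using this
    subst hk2
    exact hlen
  · intro h
    refine ⟨(pvLex a b).filter (fun r => r.1 * r.2 == q.1 * q.2),
      ⟨⟨q.1 * q.2, ⟨q, hq, rfl⟩, ?_⟩, h⟩, ?_⟩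
    · rw [pv_dp_getD]
    · exact List.mem_filter.mpr ⟨hq, by simp⟩

theorem pv_lex_nodup (a b : Int) : (pvLex a b).Nodup := by
  induction hn : (b + 1 - a).toNat generalizing a with
  | zero =>
    have h : pvLex a b = [] := by
      unfold pvLex
      rw [PySem.List.pyRange_one_eq_nil (by omega)]
      rfl
    rw [h]
    exact List.nodup_nil
  | succ n ih =>
    rw [pv_lex_row a b (by omega)]
    apply List.Nodup.append
    · exact List.Nodup.map (fun y1 y2 h => by injection h)
        (PySem.List.nodup_pyRange_one _ _)
    · exact ih (a + 1) (by omega)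
    · intro p hp hp'
      obtain ⟨y, _, rfl⟩ := List.mem_map.mp hp
      have := pv_mem_lex.mp hp'
      omega

theorem pv_exists_ne_of_lt_length {α : Type} {l : List α} {q : α} (h : l.Nodup) (hq : q ∈ l)
    (hl : 1 < l.length) : ∃ r ∈ l, r ≠ q := by
  match l, h, hq, hl with
  | c1 :: c2 :: t, h, hq, _ =>
    by_cases hc : c1 = q
    · refine ⟨c2, by simp, fun he => ?_⟩
      rw [List.nodup_cons] at h
      exact h.1 (by rw [hc, ← he]; exact List.mem_cons_self)
    · exact ⟨c1, by simp, hc⟩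

theorem pv_lt_length_of_exists_ne {α : Type} {l : List α} {q r : α} (hq : q ∈ l) (hr : r ∈ l)
    (hne : r ≠ q) : 1 < l.length := by
  match l, hq, hr with
  | [c], hq, hr =>
    rw [List.mem_singleton] at hq hr
    exact absurd (hr.trans hq.symm) hne
  | c1 :: c2 :: t, _, _ => simp

theorem pv_hof (a b : Int) (hz : ¬ (a ≤ 0 ∧ 0 ≤ b)) (q : Int × Int) (hq : q ∈ pvLex a b) :
    has_other_factorization a b q.1 q.2 = true ↔
      ∃ r ∈ pvLex a b, r ≠ q ∧ r.1 * r.2 = q.1 * q.2 := by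
  obtain ⟨x, y⟩ := q
  have hxy := pv_mem_lex.mp hq
  simp only at hxy
  unfold has_other_factorization
  simp only [List.any_eq_true, PySem.List.mem_pyRange_one]
  constructor
  · rintro ⟨a2, ⟨ha1, ha2⟩, hbody⟩
    have h0 : a2 ≠ 0 := by omega
    by_cases hm : PySem.Int.mod (x * y) a2 = 0
    · rw [if_pos hm] at hbody
      simp only [Bool.and_eq_true, decide_eq_true_eq] at hbody
      obtain ⟨⟨hab, hbs⟩, hne⟩ := hbody
      have hprod : a2 * PySem.Int.floordiv (x * y) a2 = x * y := by
        have h1 := PySem.Int.floordiv_mul_add_mod (x * y) a2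
        rw [hm, Int.add_zero] at h1
        rw [Int.mul_comm]
        exact h1
      refine ⟨(a2, PySem.Int.floordiv (x * y) a2),
        pv_mem_lex.mpr ⟨ha1, hab, by omega⟩, fun he => hne he, by simpa using hprod⟩
    · rw [if_neg hm] at hbody
      exact absurd hbody (by simp)
  · rintro ⟨⟨r1, r2⟩, hrmem, hrne, hrprod⟩
    have hr := pv_mem_lex.mp hrmem
    simp only at hr hrprod
    have h0 : r1 ≠ 0 := by omega
    refine ⟨r1, ⟨hr.1, by omega⟩, ?_⟩
    have hm : PySem.Int.mod (x * y) r1 = 0 :=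
      (PySem.Int.mod_eq_zero_iff_dvd _ _).mpr ⟨r2, hrprod.symm⟩
    rw [if_pos hm]
    have hb2 : PySem.Int.floordiv (x * y) r1 = r2 := by
      have h1 := PySem.Int.floordiv_mul_add_mod (x * y) r1
      rw [hm, Int.add_zero] at h1
      apply Int.eq_of_mul_eq_mul_right h0
      rw [h1, ← hrprod, Int.mul_comm]
    rw [hb2]
    simp only [Bool.and_eq_true, decide_eq_true_eq]
    exact ⟨⟨hr.2.1, hr.2.2⟩, fun he => hrne he⟩

theorem pv_pred (a b : Int) (hz : ¬ (a ≤ 0 ∧ 0 ≤ b)) (q : Int × Int) (hqL : q ∈ pvLex a b) :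
    ((peter_doesnt_know_x_and_y_pairs a b).contains q = true) ↔
      (has_other_factorization a b q.1 q.2 = true) := by
  have hqF : q ∈ (pvLex a b).filter (fun r => r.1 * r.2 == q.1 * q.2) :=
    List.mem_filter.mpr ⟨hqL, by simp⟩
  have hFnd : ((pvLex a b).filter (fun r => r.1 * r.2 == q.1 * q.2)).Nodup :=
    List.Nodup.filter _ (pv_lex_nodup a b)
  have iff2 : 1 < ((pvLex a b).filter (fun r => r.1 * r.2 == q.1 * q.2)).length ↔
      ∃ r ∈ (pvLex a b).filter (fun r => r.1 * r.2 == q.1 * q.2), r ≠ q :=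
    ⟨fun h => pv_exists_ne_of_lt_length hFnd hqF h,
     fun ⟨r, hr, hne⟩ => pv_lt_length_of_exists_ne hqF hr hne⟩
  have iff3 : (∃ r ∈ (pvLex a b).filter (fun r => r.1 * r.2 == q.1 * q.2), r ≠ q) ↔
      ∃ r ∈ pvLex a b, r ≠ q ∧ r.1 * r.2 = q.1 * q.2 := by
    constructor
    · rintro ⟨r, hrF, hne⟩
      have h := List.mem_filter.mp hrF
      exact ⟨r, h.1, hne, by simpa using h.2⟩
    · rintro ⟨r, hrL, hne, hpr⟩
      exact ⟨r, List.mem_filter.mpr ⟨hrL, by simp [hpr]⟩, hne⟩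
  rw [List.contains_iff_mem]
  exact (((pv_amb_mem a b q hqL).trans iff2).trans iff3).trans (pv_hof a b hz q hqL).symm

theorem pv_main (a b : Int) (hz : ¬ (a ≤ 0 ∧ 0 ≤ b)) :
    samantha_knows_that_peter_doesnt_know_x_and_y_pairs a b =
      samantha_knows_that_peter_doesnt_know_x_and_y_pairs_alt a b := by
  unfold samantha_knows_that_peter_doesnt_know_x_and_y_pairs
    samantha_knows_that_peter_doesnt_know_x_and_y_pairs_alt
  simp only []
  -- A side
  rw [PySem.List.foldl_if_eq_foldl_filter, PySem.List.foldl_append_eq_flatten,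
    List.nil_append,
    PySem.Dict.values_eq_map_keys _ (pv_dS_nodup a b) [],
    pv_dS_keys, pv_sums]
  simp only [pv_dS_getD, pv_group]
  -- B side
  have hBmap :
      (PySem.List.pyRange (2 * a) (2 * b + 1) 1).foldl (fun res s =>
        if ((PySem.List.pyRange (max a (s - b)) (PySem.Int.floordiv s 2 + 1) 1).map
            (fun x => (x, s - x))).all (fun q => has_other_factorization a b q.1 q.2) then
          res ++ (PySem.List.pyRange (max a (s - b)) (PySem.Int.floordiv s 2 + 1) 1).map
            (fun x => (x, s - x))
        else res) [] =
      ((PySem.List.pyRange (2 * a) (2 * b + 1) 1).map (fun s => pvGrp a b s)).foldl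
        (fun res g => if g.all (fun q => has_other_factorization a b q.1 q.2) then res ++ g
          else res) [] := by
    rw [List.foldl_map]
    rfl
  rw [hBmap, PySem.List.foldl_if_eq_foldl_filter, PySem.List.foldl_append_eq_flatten,
    List.nil_append]
  apply congrArg List.flatten
  apply List.filter_congr
  intro v hv
  obtain ⟨s, hs, rfl⟩ := List.mem_map.mp hv
  rw [Bool.eq_iff_iff]
  simp only [List.all_eq_true]
  constructor
  · intro h q hq
    have hqLex : q ∈ pvLex a b := by
      rw [← pv_group] at hq
      exact (List.mem_filter.mp hq).1
    exact (pv_pred a b hz q hqLex).mp (h q hq)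
  · intro h q hq
    have hqLex : q ∈ pvLex a b := by
      rw [← pv_group] at hq
      exact (List.mem_filter.mp hq).1
    exact (pv_pred a b hz q hqLex).mpr (h q hq)

-- ===== VERDICT (by name: the statement is the Claim_ definition above) =====
theorem samantha_knows_that_peter_doesnt_know_x_and_y_pairs_spec : Claim_equal_samantha_knows_that_peter_doesnt_know_x_and_y_pairs := by
  intro start stop _ hPre
  unfold Spec_samantha_knows_that_peter_doesnt_know_x_and_y_pairs
  exact pv_main start stop hPre
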